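-- pv_equiv track=rewrite | github.com/Nexius2/VODUM | app/tasks/send_expiration_emails.py | _match_after_window
-- ===== SOURCE A (Python) =====
-- def _match_after_window(days_left: int, current_value: int | None, all_values: list[int]) -> bool:
--     if current_value is None or days_left >= 0:
--         return False
--
--     overdue_days = -days_left
--     higher_values = sorted([v for v in all_values if v > current_value])
--     upper_bound = higher_values[0] if higher_values else None
--
--     if upper_bound is None:
--         return overdue_days >= current_value
--     return current_value <= overdue_days < upper_bound
-- ===== SOURCE B (Python) =====
-- def _match_after_window(days_left: int, current_value: int | None, all_values: list[int]) -> bool: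
--     if current_value is None or days_left >= 0:
--         return False
--     overdue_days = -days_left
--     return overdue_days >= current_value and all(
--         v <= current_value or overdue_days < v for v in all_values
--     )
-- ===== Notes on version B (the rewrite author's own statement) =====
-- stated objective: simpler
-- what changed: Replaces building, sorting and indexing a list of higher values with a direct quantified condition: overdue_days >= current_value and every value above current_value exceeds overdue_days, which is equivalent because 'overdue_days < min of the higher values' is exactly 'overdue_days < every higher value'.
import Mathlib
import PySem

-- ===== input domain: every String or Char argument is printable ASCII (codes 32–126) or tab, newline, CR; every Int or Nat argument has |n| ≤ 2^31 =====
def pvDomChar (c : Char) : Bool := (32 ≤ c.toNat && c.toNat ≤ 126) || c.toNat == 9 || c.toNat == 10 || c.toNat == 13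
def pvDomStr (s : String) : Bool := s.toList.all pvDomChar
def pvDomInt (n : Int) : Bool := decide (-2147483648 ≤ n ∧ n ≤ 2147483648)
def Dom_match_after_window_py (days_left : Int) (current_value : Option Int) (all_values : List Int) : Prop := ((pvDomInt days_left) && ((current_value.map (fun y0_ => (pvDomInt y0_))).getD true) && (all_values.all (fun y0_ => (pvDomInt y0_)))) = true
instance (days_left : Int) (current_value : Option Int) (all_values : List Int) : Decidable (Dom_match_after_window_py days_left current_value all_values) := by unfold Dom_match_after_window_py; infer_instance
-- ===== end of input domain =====

-- B replaces A's filter-sort-index computation of the least higher value with a direct quantified check (simpler, different decomposition).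


-- ===== PORT A =====
def match_after_window_py (days_left : Int) (current_value : Option Int) (all_values : List Int) : Bool :=
  match current_value with
  | none => false
  | some c =>
    if days_left ≥ 0 then false
    else
      let overdue_days := -days_left
      let higher_values := PySem.List.sorted (all_values.filter (fun v => decide (c < v))) (fun x => x) false
      match higher_values with
      | [] => decide (overdue_days ≥ c)          -- upper_bound is None
      | ub :: _ => decide (c ≤ overdue_days ∧ overdue_days < ub)

-- ===== PORT B =====
def match_after_window_py_alt (days_left : Int) (current_value : Option Int) (all_values : List Int) : Bool :=
  match current_value with
  | none => false
  | some c =>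
    if days_left ≥ 0 then false
    else
      let overdue_days := -days_left
      decide (overdue_days ≥ c) && all_values.all (fun v => decide (v ≤ c) || decide (overdue_days < v))

-- ===== PRECONDITION & SPEC =====
def Spec_match_after_window_py (days_left : Int) (current_value : Option Int) (all_values : List Int) (out : Bool) : Prop := out = match_after_window_py_alt days_left current_value all_values
instance (days_left : Int) (current_value : Option Int) (all_values : List Int) (out : Bool) : Decidable (Spec_match_after_window_py days_left current_value all_values out) := by unfold Spec_match_after_window_py; infer_instance

-- ===== CLAIM (what is proved, stated in full; the proofs are below) =====
def Claim_equal_match_after_window_py : Prop := ∀ (days_left : Int) (current_value : Option Int) (all_values : List Int), Dom_match_after_window_py days_left current_value all_values → Spec_match_after_window_py days_left current_value all_values (match_after_window_py days_left current_value all_values)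

-- ===== LEMMAS AND PROOFS =====

-- B's `all` over the whole list is the universal statement over A's filtered list
theorem pvAll_eq_filter (c od : Int) (l : List Int) :
    l.all (fun v => decide (v ≤ c) || decide (od < v))
      = decide (∀ v ∈ l.filter (fun v => decide (c < v)), od < v) := by
  induction l with
  | nil => simp
  | cons x t ih =>
    by_cases hx : c < x
    · by_cases ho : od < x <;> simp [hx, not_le.mpr hx, ho, ih]
    · simp [hx, le_of_not_gt hx, ih]

-- the head of the (nonempty) sorted filtered list is its minimum
theorem pvHead_min (c : Int) (l : List Int) (m : Int) (s : List Int)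
    (hs : PySem.List.sorted (l.filter (fun v => decide (c < v))) (fun x => x) false = m :: s) :
    m ∈ l.filter (fun v => decide (c < v)) ∧
    ∀ v ∈ l.filter (fun v => decide (c < v)), m ≤ v := by
  constructor
  · have : m ∈ PySem.List.sorted (l.filter (fun v => decide (c < v))) (fun x => x) false := by
      rw [hs]; exact List.mem_cons_self
    exact (PySem.List.mem_sorted ..).mp this
  · exact PySem.List.key_head_sorted_le _ _ hs

-- ===== VERDICT (by name: the statement is the Claim_ definition above) =====
theorem match_after_window_py_spec : Claim_equal_match_after_window_py := by
  intro days_left current_value all_values _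
  unfold Spec_match_after_window_py match_after_window_py match_after_window_py_alt
  cases current_value with
  | none => rfl
  | some c =>
    by_cases hd : days_left ≥ 0
    · simp [hd]
    · simp only [hd, if_false]
      rw [pvAll_eq_filter c (-days_left) all_values]
      cases hsort : PySem.List.sorted (all_values.filter (fun v => decide (c < v))) (fun x => x) false with
      | nil =>
        have hnil := (PySem.List.sorted_eq_nil_iff ..).mp hsort
        simp [hnil]
      | cons m s =>
        obtain ⟨hmem, hmin⟩ := pvHead_min c all_values m s hsort
        have hmv := List.mem_filter.mp hmem
        have hmc : c < m := by simpa using hmv.2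
        have hiff : (∀ v ∈ all_values, c < v → -days_left < v) ↔ -days_left < m :=
          ⟨fun h => h m hmv.1 hmc,
           fun h v hv hcv => lt_of_lt_of_le h (hmin v (List.mem_filter.mpr ⟨hv, by simpa using hcv⟩))⟩
        simp [hiff]
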